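-- pv_equiv track=rewrite | github.com/Erik262/AoC | day_10/puzzle.py | min_presses
-- ===== SOURCE A (Python) =====
-- def subset_xor_arrays(buttons):
--     n = len(buttons)
--     size = 1 << n
--     xs = [0] * size
--     cs = [0] * size
--
--     for s in range(1, size):
--         lsb = s & -s
--         i = lsb.bit_length() - 1
--         prev = s ^ lsb
--         xs[s] = xs[prev] ^ buttons[i]
--         cs[s] = cs[prev] + 1
--
--     return xs, cs
--
-- def min_presses(target, buttons):
--     if target == 0:
--         return 0
--
--     m = len(buttons)
--     mid = m // 2
--     first = buttons[:mid]
--     second = buttons[mid:]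
--     xs1, cs1 = subset_xor_arrays(first)
--     best_first = {}
--
--     for x, c in zip(xs1, cs1):
--         if x not in best_first or c < best_first[x]:
--             best_first[x] = c
--
--     xs2, cs2 = subset_xor_arrays(second)
--     best = 10**18
--     for x2, c2 in zip(xs2, cs2):
--         need = target ^ x2
--         if need in best_first:
--             t = c2 + best_first[need]
--             if t < best:
--                 best = t
--
--     return best
-- ===== SOURCE B (Python) =====
-- def min_presses(target, buttons):
--     if target == 0:
--         return 0
--
--     def go(bs, acc, cnt):
--         if not bs:
--             return cnt if acc == target else 10**18
--         rest = bs[1:]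
--         return min(go(rest, acc, cnt), go(rest, acc ^ bs[0], cnt + 1))
--
--     return go(buttons, 0, 0)
-- ===== Notes on version B (the rewrite author's own statement) =====
-- stated objective: simpler
-- what changed: B replaces A's meet-in-the-middle split (two 2^(m/2) subset-XOR tables plus a hash join) with one direct recursive include/exclude walk over the whole button list, tracking the running XOR and press count.
import Mathlib
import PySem

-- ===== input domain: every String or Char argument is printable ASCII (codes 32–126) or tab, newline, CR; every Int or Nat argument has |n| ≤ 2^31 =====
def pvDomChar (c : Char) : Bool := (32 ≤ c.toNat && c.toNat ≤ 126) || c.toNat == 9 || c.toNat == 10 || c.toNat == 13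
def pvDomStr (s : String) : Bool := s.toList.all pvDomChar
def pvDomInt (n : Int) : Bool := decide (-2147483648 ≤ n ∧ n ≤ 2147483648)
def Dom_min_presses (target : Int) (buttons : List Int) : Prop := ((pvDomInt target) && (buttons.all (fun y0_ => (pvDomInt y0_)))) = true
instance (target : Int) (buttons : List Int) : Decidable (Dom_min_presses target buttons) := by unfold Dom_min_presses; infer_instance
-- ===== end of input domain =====

-- B replaces A's meet-in-the-middle subset tables and hash join with one direct recursive
-- include/exclude walk over the button list (a structurally different, simpler algorithm;
-- not faster); the return values are proved equal for all inputs.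

-- ===== PORT A =====
-- helper from A's module: xs[s] = XOR of buttons selected by the bits of s, cs[s] = popcount s,
-- built by A's lsb recurrence. buttons[i] and xs[prev]/cs[prev] are always in range here, so the
-- total pyGetD/pySetD forms are exact.
def subset_xor_arrays (buttons : List Int) : List Int × List Int :=
  let n := buttons.length
  let size : Int := (1 : Int) <<< n
  let xs : List Int := PySem.List.pyRepeat [(0 : Int)] size
  let cs : List Int := PySem.List.pyRepeat [(0 : Int)] size
  (PySem.List.pyRange 1 size).foldl (fun p s =>
    let lsb := PySem.Int.band s (-s)
    let i : Int := (PySem.Int.bitLength lsb : Int) - 1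
    let prev := PySem.Int.bxor s lsb
    (PySem.List.pySetD p.1 s (PySem.Int.bxor (PySem.List.pyGetD p.1 prev 0) (PySem.List.pyGetD buttons i 0)),
     PySem.List.pySetD p.2 s (PySem.List.pyGetD p.2 prev 0 + 1))) (xs, cs)

def min_presses (target : Int) (buttons : List Int) : Int :=
  if target = 0 then 0
  else
    let m : Int := buttons.length
    let mid : Int := PySem.Int.floordiv m 2
    let first := PySem.List.slice buttons none (some mid)
    let second := PySem.List.slice buttons (some mid) none
    let p1 := subset_xor_arrays first
    let best_first : PySem.Dict Int Int :=
      (p1.1.zip p1.2).foldl (fun d xc =>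
        match PySem.Dict.get? d xc.1 with
        | none => PySem.Dict.insert d xc.1 xc.2
        | some v => if xc.2 < v then PySem.Dict.insert d xc.1 xc.2 else d) PySem.Dict.empty
    let p2 := subset_xor_arrays second
    (p2.1.zip p2.2).foldl (fun best xc =>
      let need := PySem.Int.bxor target xc.1
      match PySem.Dict.get? best_first need with
      | none => best
      | some v => if xc.2 + v < best then xc.2 + v else best) (10 ^ 18)

-- ===== PORT B =====
-- B's recursive include/exclude walk `go`
def goAlt (target : Int) : List Int → Int → Int → Int
  | [], acc, cnt => if acc = target then cnt else 10 ^ 18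
  | b :: rest, acc, cnt =>
      min (goAlt target rest acc cnt) (goAlt target rest (PySem.Int.bxor acc b) (cnt + 1))

def min_presses_alt (target : Int) (buttons : List Int) : Int :=
  if target = 0 then 0 else goAlt target buttons 0 0

-- ===== PRECONDITION & SPEC =====
def Spec_min_presses (target : Int) (buttons : List Int) (out : Int) : Prop := out = min_presses_alt target buttons
instance (target : Int) (buttons : List Int) (out : Int) : Decidable (Spec_min_presses target buttons out) := by unfold Spec_min_presses; infer_instance

-- ===== CLAIM (what is proved, stated in full; the proofs are below) =====
def Claim_equal_min_presses : Prop := ∀ (target : Int) (buttons : List Int), Dom_min_presses target buttons → Spec_min_presses target buttons (min_presses target buttons)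

-- ===== LEMMAS AND PROOFS =====

theorem bxor_zero_left (a : Int) : PySem.Int.bxor 0 a = a := by
  rw [PySem.Int.bxor_comm, PySem.Int.bxor_zero]
def pcN (s : Nat) : Int := (PySem.Int.bitCount (s : Int) : Int)
theorem pcN_zero : pcN 0 = 0 := by simp [pcN]
theorem pcN_half (m : Nat) : pcN m = pcN (m / 2) + ((m % 2 : Nat) : Int) := by
  rcases Nat.eq_zero_or_pos m with h | h
  · subst h; simp [pcN]
  · have := PySem.Int.bitCount_natCast (m := m) h
    simp [pcN, this]
    push_cast
    ring
theorem pcN_double (u r : Nat) (hr : r < 2) : pcN (2 * u + r) = pcN u + r := by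
  rw [pcN_half (2 * u + r), show (2 * u + r) / 2 = u by omega, show (2 * u + r) % 2 = r by omega]
def xbL : List Int → Nat → Int
  | [], _ => 0
  | b :: bs, s => PySem.Int.bxor (if s % 2 = 1 then b else 0) (xbL bs (s / 2))
theorem xbL_zero (bs : List Int) : xbL bs 0 = 0 := by
  induction bs with
  | nil => rfl
  | cons b bs ih => simp [xbL, ih]
theorem xbL_cons (b : Int) (bs : List Int) (u r : Nat) (hr : r < 2) :
    xbL (b :: bs) (2 * u + r) = PySem.Int.bxor (if r = 1 then b else 0) (xbL bs u) := by
  simp only [xbL, show (2 * u + r) % 2 = r by omega, show (2 * u + r) / 2 = u by omega]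

def n2i (s : Bool) (m : Nat) : Int := if s then -(m : Int) - 1 else (m : Int)

theorem bxor_n2i (s₁ s₂ : Bool) (m₁ m₂ : Nat) :
    PySem.Int.bxor (n2i s₁ m₁) (n2i s₂ m₂) = n2i (s₁ ^^ s₂) (m₁ ^^^ m₂) := by
  cases s₁ <;> cases s₂ <;> simp [PySem.Int.bxor, n2i, Int.toNat_natCast] <;> omega

theorem n2i_surj (a : Int) : ∃ s m, a = n2i s m := by
  cases a with
  | ofNat n => exact ⟨false, n, rfl⟩
  | negSucc n =>
    refine ⟨true, n, ?_⟩
    simp [n2i, Int.negSucc_eq]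
    ring

theorem bxor_assoc' (a b c : Int) :
    PySem.Int.bxor (PySem.Int.bxor a b) c = PySem.Int.bxor a (PySem.Int.bxor b c) := by
  obtain ⟨s₁, m₁, rfl⟩ := n2i_surj a
  obtain ⟨s₂, m₂, rfl⟩ := n2i_surj b
  obtain ⟨s₃, m₃, rfl⟩ := n2i_surj c
  rw [bxor_n2i, bxor_n2i, bxor_n2i, bxor_n2i, Bool.xor_assoc, Nat.xor_assoc]

theorem xbL_append (l₁ l₂ : List Int) :
    ∀ (s₁ s₂ : Nat), s₁ < 2 ^ l₁.length →
      xbL (l₁ ++ l₂) (s₁ + 2 ^ l₁.length * s₂) = PySem.Int.bxor (xbL l₁ s₁) (xbL l₂ s₂) := by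
  induction l₁ with
  | nil =>
    intro s₁ s₂ h
    have hs : s₁ = 0 := by simpa using h
    subst hs
    simp [xbL, bxor_zero_left]
  | cons b l₁ ih =>
    intro s₁ s₂ h
    have hq : ∃ q, 2 ^ l₁.length * s₂ = q := ⟨_, rfl⟩
    obtain ⟨q, hq⟩ := hq
    have hlen : (b :: l₁).length = l₁.length + 1 := rfl
    have hpow : 2 ^ (l₁.length + 1) = 2 * 2 ^ l₁.length := by rw [pow_succ]; ring
    have harg : s₁ + 2 ^ (b :: l₁).length * s₂ = 2 * (s₁ / 2 + q) + s₁ % 2 := by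
      rw [hlen, hpow, show 2 * 2 ^ l₁.length * s₂ = 2 * (2 ^ l₁.length * s₂) by ring, hq]
      omega
    have hdiv : s₁ / 2 < 2 ^ l₁.length := by
      rw [hlen, hpow] at h
      omega
    rw [List.cons_append, harg, xbL_cons _ _ _ _ (by omega), ← hq,
      ih (s₁ / 2) s₂ hdiv, show xbL (b :: l₁) s₁ =
        PySem.Int.bxor (if s₁ % 2 = 1 then b else 0) (xbL l₁ (s₁ / 2)) from rfl,
      bxor_assoc']

theorem pcN_split (n : Nat) :
    ∀ (s₁ s₂ : Nat), s₁ < 2 ^ n → pcN (s₁ + 2 ^ n * s₂) = pcN s₁ + pcN s₂ := by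
  induction n with
  | zero =>
    intro s₁ s₂ h
    have hs : s₁ = 0 := by omega
    subst hs
    simp [pcN_zero]
  | succ n ih =>
    intro s₁ s₂ h
    obtain ⟨q, hq⟩ : ∃ q, 2 ^ n * s₂ = q := ⟨_, rfl⟩
    have hpow : 2 ^ (n + 1) = 2 * 2 ^ n := by rw [pow_succ]; ring
    have harg : s₁ + 2 ^ (n + 1) * s₂ = 2 * (s₁ / 2 + q) + s₁ % 2 := by
      rw [hpow, show 2 * 2 ^ n * s₂ = 2 * (2 ^ n * s₂) by ring, hq]
      omega
    have hdiv : s₁ / 2 < 2 ^ n := by rw [hpow] at h; omega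
    rw [harg, pcN_double _ _ (by omega), ← hq, ih (s₁ / 2) s₂ hdiv,
      pcN_half s₁]
    push_cast
    ring

theorem lsbNat : ∀ m : Nat, 0 < m → ∃ k, m - (m &&& (m - 1)) = 2 ^ k ∧ m.testBit k = true := by
  intro m
  induction m using Nat.strong_induction_on with
  | _ m ih =>
    intro hm
    rcases Nat.even_or_odd m with ⟨t, ht⟩ | ⟨t, ht⟩
    · have ht' : m = 2 * t := by omega
      have htpos : 0 < t := by omega
      obtain ⟨k, hk1, hk2⟩ := ih t (by omega) htpos
      have hland : m &&& (m - 1) = 2 * (t &&& (t - 1)) := by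
        apply Nat.eq_of_testBit_eq
        intro i
        cases i with
        | zero =>
          simp only [Nat.testBit_land, Nat.testBit_zero]
          have h1 : m % 2 = 0 := by omega
          have h2 : (2 * (t &&& (t - 1))) % 2 = 0 := by omega
          simp [h1, h2]
        | succ i =>
          rw [Nat.testBit_land, Nat.testBit_succ, Nat.testBit_succ, Nat.testBit_succ,
            show m / 2 = t by omega, show (m - 1) / 2 = t - 1 by omega,
            show 2 * (t &&& (t - 1)) / 2 = t &&& (t - 1) by omega, Nat.testBit_land]
      refine ⟨k + 1, ?_, ?_⟩
      · have hle : t &&& (t - 1) ≤ t := Nat.and_le_left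
        rw [hland, pow_succ]
        omega
      · rw [Nat.testBit_succ, show m / 2 = t by omega, hk2]
    · have hland : m &&& (m - 1) = 2 * t := by
        apply Nat.eq_of_testBit_eq
        intro i
        cases i with
        | zero =>
          simp only [Nat.testBit_land, Nat.testBit_zero]
          have h2 : (2 * t) % 2 = 0 := by omega
          simp [h2]
          omega
        | succ i =>
          rw [Nat.testBit_land, Nat.testBit_succ, Nat.testBit_succ, Nat.testBit_succ,
            show m / 2 = t by omega, show (m - 1) / 2 = t by omega]
          simp
      refine ⟨0, by omega, by simp [Nat.testBit_zero]; omega⟩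

theorem testBit_lt_len {s k n : Nat} (h : s < 2 ^ n) (hb : s.testBit k = true) : k < n := by
  by_contra hkn
  have hsk : s < 2 ^ k := lt_of_lt_of_le h (Nat.pow_le_pow_right (by omega) (by omega))
  rw [Nat.testBit_lt_two_pow hsk] at hb
  exact absurd hb (by simp)

theorem clearBit : ∀ (k : Nat) (bs : List Int) (s : Nat), s.testBit k = true → k < bs.length →
    PySem.Int.bxor (xbL bs (s ^^^ 2 ^ k)) (bs.getD k 0) = xbL bs s ∧
    pcN (s ^^^ 2 ^ k) + 1 = pcN s ∧ s ^^^ 2 ^ k < s := by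
  intro k
  induction k with
  | zero =>
    intro bs s hbit hlen
    match bs with
    | b :: bs' =>
      have hodd : s % 2 = 1 := by
        have := hbit
        rw [Nat.testBit_zero] at this
        simpa using this
      have hx : s ^^^ 2 ^ 0 = 2 * (s / 2) + 0 := by
        apply Nat.eq_of_testBit_eq
        intro i
        cases i with
        | zero =>
          rw [Nat.testBit_xor, Nat.testBit_zero, Nat.testBit_zero, Nat.testBit_zero]
          have : (2 * (s / 2) + 0) % 2 = 0 := by omega
          simp [hodd, this]
        | succ i =>
          rw [Nat.testBit_xor, Nat.testBit_succ, Nat.testBit_succ, Nat.testBit_succ,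
            show 2 ^ 0 / 2 = 0 by norm_num, show (2 * (s / 2) + 0) / 2 = s / 2 by omega,
            Nat.zero_testBit, Bool.xor_false]
      have hs : s = 2 * (s / 2) + 1 := by omega
      refine ⟨?_, ?_, by omega⟩
      · rw [hx, xbL_cons _ _ _ _ (by omega)]
        conv_rhs => rw [hs]
        rw [xbL_cons _ _ _ _ (by omega)]
        simp only [List.getD, show (0:Nat) ≠ 1 by decide, if_neg, reduceIte]
        rw [bxor_zero_left, PySem.Int.bxor_comm]
        simp
      · rw [hx, pcN_double _ _ (by omega)]
        conv_rhs => rw [hs]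
        rw [pcN_double _ _ (by omega)]
        push_cast
        ring
  | succ k ih =>
    intro bs s hbit hlen
    match bs with
    | b :: bs' =>
      have hbit' : (s / 2).testBit k = true := by rwa [Nat.testBit_succ] at hbit
      have hlen' : k < bs'.length := by
        simp only [List.length_cons] at hlen
        omega
      obtain ⟨ihx, ihp, ihlt⟩ := ih bs' (s / 2) hbit' hlen'
      have hx : s ^^^ 2 ^ (k + 1) = 2 * (s / 2 ^^^ 2 ^ k) + s % 2 := by
        apply Nat.eq_of_testBit_eq
        intro i
        cases i with
        | zero =>
          rw [Nat.testBit_xor, Nat.testBit_zero, Nat.testBit_zero, Nat.testBit_zero]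
          have h1 : 2 ^ (k + 1) % 2 = 0 := by
            have : 2 ^ (k + 1) = 2 * 2 ^ k := by rw [pow_succ]; ring
            omega
          have h2 : (2 * (s / 2 ^^^ 2 ^ k) + s % 2) % 2 = s % 2 := by omega
          simp [h1, h2]
        | succ i =>
          rw [Nat.testBit_xor, Nat.testBit_succ, Nat.testBit_succ, Nat.testBit_succ,
            show 2 ^ (k + 1) / 2 = 2 ^ k by
              rw [pow_succ]; omega,
            show (2 * (s / 2 ^^^ 2 ^ k) + s % 2) / 2 = s / 2 ^^^ 2 ^ k by omega,
            Nat.testBit_xor]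
      have hs : s = 2 * (s / 2) + s % 2 := by omega
      have hgd : (b :: bs').getD (k + 1) 0 = bs'.getD k 0 := by simp [List.getD]
      refine ⟨?_, ?_, by omega⟩
      · rw [hx, xbL_cons _ _ _ _ (by omega), hgd, bxor_assoc', ihx]
        conv_rhs => rw [hs]
        rw [xbL_cons _ _ _ _ (by omega)]
      · rw [hx, pcN_double _ _ (by omega)]
        conv_rhs => rw [hs]
        rw [pcN_double _ _ (by omega)]
        omega

def sxaStep (buttons : List Int) (p : List Int × List Int) (s : Int) : List Int × List Int :=
  let lsb := PySem.Int.band s (-s)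
  let i : Int := (PySem.Int.bitLength lsb : Int) - 1
  let prev := PySem.Int.bxor s lsb
  (PySem.List.pySetD p.1 s (PySem.Int.bxor (PySem.List.pyGetD p.1 prev 0) (PySem.List.pyGetD buttons i 0)),
   PySem.List.pySetD p.2 s (PySem.List.pyGetD p.2 prev 0 + 1))

theorem band_neg_self (m : Nat) (h : 0 < m) :
    PySem.Int.band (m : Int) (-(m : Int)) = ((m - (m &&& (m - 1)) : Nat) : Int) := by
  have h1 : ¬ (0 ≤ -(m : Int)) := by omega
  simp only [PySem.Int.band, if_pos (by positivity : (0:Int) ≤ (m:Int)), if_neg h1]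
  rw [show (-(-(m : Int)) - 1).toNat = m - 1 by omega, Int.toNat_natCast]

theorem bitLength_two_pow (k : Nat) : PySem.Int.bitLength ((2 ^ k : Nat) : Int) = k + 1 := by
  have h1 := PySem.Int.lt_two_pow_bitLength ((2 ^ k : Nat) : Int)
  have h2 := PySem.Int.two_pow_bitLength_le ((2 ^ k : Nat) : Int) (by positivity)
  rw [Int.natAbs_natCast] at h1 h2
  have hk1 : k < PySem.Int.bitLength ((2 ^ k : Nat) : Int) :=
    (Nat.pow_lt_pow_iff_right (by omega)).mp h1
  have hk2 : PySem.Int.bitLength ((2 ^ k : Nat) : Int) - 1 ≤ k :=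
    (Nat.pow_le_pow_iff_right (by omega)).mp h2
  omega

theorem getD_set_lt (l : List Int) (K j : Nat) (v : Int) (hj : j < l.length) :
    (l.set K v).getD j 0 = if K = j then v else l.getD j 0 := by
  rw [List.getD_eq_getElem (l.set K v) 0 (by simpa using hj), List.getElem_set]
  by_cases h : K = j
  · rw [if_pos h, if_pos h]
  · rw [if_neg h, if_neg h, ← List.getD_eq_getElem l 0 hj]

theorem sxa_loop (bs : List Int) : ∀ K : Nat, K ≤ 2 ^ bs.length →
    ((((PySem.List.pyRange 1 (K : Int)).foldl (sxaStep bs)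
      (List.replicate (2 ^ bs.length) 0, List.replicate (2 ^ bs.length) 0)).1.length = 2 ^ bs.length) ∧
     (((PySem.List.pyRange 1 (K : Int)).foldl (sxaStep bs)
      (List.replicate (2 ^ bs.length) 0, List.replicate (2 ^ bs.length) 0)).2.length = 2 ^ bs.length)) ∧
    (∀ j, j < 2 ^ bs.length →
      ((PySem.List.pyRange 1 (K : Int)).foldl (sxaStep bs)
        (List.replicate (2 ^ bs.length) 0, List.replicate (2 ^ bs.length) 0)).1.getD j 0
        = if j < K then xbL bs j else 0) ∧
    (∀ j, j < 2 ^ bs.length →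
      ((PySem.List.pyRange 1 (K : Int)).foldl (sxaStep bs)
        (List.replicate (2 ^ bs.length) 0, List.replicate (2 ^ bs.length) 0)).2.getD j 0
        = if j < K then pcN j else 0) := by
  intro K
  induction K with
  | zero =>
    intro _
    rw [PySem.List.pyRange_one_eq_nil (by norm_num)]
    refine ⟨⟨by simp, by simp⟩, fun j hj => ?_, fun j hj => ?_⟩ <;>
      simp [List.getD_replicate (0:Int) hj]
  | succ K ih =>
    intro hK1
    rcases Nat.eq_zero_or_pos K with hK0 | hKpos
    · subst hK0
      rw [show ((1:Nat):Int) = 1 by norm_num, PySem.List.pyRange_one_eq_nil (by norm_num)]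
      refine ⟨⟨by simp, by simp⟩, fun j hj => ?_, fun j hj => ?_⟩ <;>
        rcases Nat.eq_zero_or_pos j with rfl | hjpos <;>
        simp [List.getD_replicate (0:Int) hj, xbL_zero, pcN_zero] <;>
        omega
    · obtain ⟨⟨ihl1, ihl2⟩, ihx, ihc⟩ := ih (by omega)
      have hsplit : PySem.List.pyRange 1 ((K + 1 : Nat) : Int) =
          PySem.List.pyRange 1 (K : Int) ++ [(K : Int)] := by
        rw [show ((K + 1 : Nat) : Int) = (K : Int) + 1 by push_cast; ring]
        exact PySem.List.pyRange_one_succ_right (by exact_mod_cast hKpos)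
      obtain ⟨k, hk1, hk2⟩ := lsbNat K hKpos
      have hklen : k < bs.length := testBit_lt_len (by omega : K < 2 ^ bs.length) hk2
      obtain ⟨hxor, hpc, hlt⟩ := clearBit k bs K hk2 hklen
      set st := (PySem.List.pyRange 1 (K : Int)).foldl (sxaStep bs)
        (List.replicate (2 ^ bs.length) 0, List.replicate (2 ^ bs.length) 0) with hst
      rw [hsplit, List.foldl_append, List.foldl_cons, List.foldl_nil]
      have hband : PySem.Int.band (K : Int) (-(K : Int)) = ((2 ^ k : Nat) : Int) := by
        rw [band_neg_self K hKpos, hk1]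
      have hstep : sxaStep bs st (K : Int) =
          (st.1.set K (PySem.Int.bxor (st.1.getD (K ^^^ 2 ^ k) 0) (bs.getD k 0)),
           st.2.set K (st.2.getD (K ^^^ 2 ^ k) 0 + 1)) := by
        simp only [sxaStep, hband, bitLength_two_pow,
          show ((k + 1 : Nat) : Int) - 1 = ((k : Nat) : Int) by push_cast; ring,
          PySem.Int.bxor_natCast, PySem.List.pyGetD_natCast, PySem.List.pySetD_natCast]
      rw [hstep]
      have hprevlt : K ^^^ 2 ^ k < 2 ^ bs.length := by omega
      have hxval : st.1.getD (K ^^^ 2 ^ k) 0 = xbL bs (K ^^^ 2 ^ k) := by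
        rw [ihx _ hprevlt, if_pos (by omega)]
      have hcval : st.2.getD (K ^^^ 2 ^ k) 0 = pcN (K ^^^ 2 ^ k) := by
        rw [ihc _ hprevlt, if_pos (by omega)]
      refine ⟨⟨by simpa using ihl1, by simpa using ihl2⟩, fun j hj => ?_, fun j hj => ?_⟩
      · rw [getD_set_lt st.1 K j _ (by rw [ihl1]; exact hj)]
        by_cases hjK : K = j
        · subst hjK
          rw [if_pos rfl, hxval, hxor, if_pos (by omega)]
        · rw [if_neg hjK, ihx _ hj]
          have hiff : (j < K) ↔ (j < K + 1) := by omega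
          simp only [hiff]
      · rw [getD_set_lt st.2 K j _ (by rw [ihl2]; exact hj)]
        by_cases hjK : K = j
        · subst hjK
          rw [if_pos rfl, hcval, if_pos (by omega), hpc]
        · rw [if_neg hjK, ihc _ hj]
          have hiff : (j < K) ↔ (j < K + 1) := by omega
          simp only [hiff]

def omStep (first : List Int) (y : Int) (o : Option Int) (s : Nat) : Option Int :=
  if xbL first s = y then
    some (match o with | none => pcN s | some v => min v (pcN s))
  else o

def om (first : List Int) (y : Int) (L : List Nat) : Option Int := L.foldl (omStep first y) none

def dStep (d : PySem.Dict Int Int) (xc : Int × Int) : PySem.Dict Int Int :=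
  match PySem.Dict.get? d xc.1 with
  | none => PySem.Dict.insert d xc.1 xc.2
  | some v => if xc.2 < v then PySem.Dict.insert d xc.1 xc.2 else d

theorem dict_get_gen (first : List Int) (y : Int) :
    ∀ (L : List Nat) (d : PySem.Dict Int Int),
      PySem.Dict.get? ((L.map (fun s => (xbL first s, pcN s))).foldl dStep d) y =
        L.foldl (omStep first y) (PySem.Dict.get? d y) := by
  intro L
  induction L with
  | nil => intro d; rfl
  | cons s L ih =>
    intro d
    rw [List.map_cons, List.foldl_cons, List.foldl_cons, ih]
    congr 1
    show PySem.Dict.get? (dStep d (xbL first s, pcN s)) y = omStep first y (PySem.Dict.get? d y) s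
    by_cases hy : xbL first s = y
    · subst hy
      unfold dStep omStep
      cases h : PySem.Dict.get? d (xbL first s) with
      | none => simp [PySem.Dict.get?_insert_self]
      | some v =>
        simp only []
        by_cases hlt : pcN s < v
        · rw [if_pos hlt, PySem.Dict.get?_insert_self]
          congr 1
          omega
        · rw [if_neg hlt, h]
          congr 1
          omega
    · unfold dStep omStep
      rw [if_neg hy]
      cases h : PySem.Dict.get? d (xbL first s) with
      | none => exact PySem.Dict.get?_insert_of_ne d _ (fun hh => hy hh.symm)
      | some v =>
        show (if pcN s < v then d.insert (xbL first s) (pcN s) else d).get? y = d.get? y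
        by_cases hlt : pcN s < v
        · rw [if_pos hlt]
          exact PySem.Dict.get?_insert_of_ne d _ (fun hh => hy hh.symm)
        · rw [if_neg hlt]

theorem om_append_singleton (first : List Int) (y : Int) (L : List Nat) (s : Nat) :
    om first y (L ++ [s]) = omStep first y (om first y L) s := by
  unfold om
  rw [List.foldl_append, List.foldl_cons, List.foldl_nil]

theorem om_none_iff (first : List Int) (y : Int) :
    ∀ L : List Nat, om first y L = none ↔ ∀ s ∈ L, xbL first s ≠ y := by
  intro L
  induction L using List.reverseRecOn with
  | nil => simp [om]
  | append_singleton L s ih =>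
    rw [om_append_singleton]
    unfold omStep
    by_cases h : xbL first s = y
    · rw [if_pos h]
      constructor
      · intro hh; exact absurd hh (by simp)
      · intro hall; exact absurd h (hall s (by simp))
    · rw [if_neg h, ih]
      constructor
      · intro hall s' hs'
        rcases List.mem_append.mp hs' with hs' | hs'
        · exact hall s' hs'
        · simp at hs'; subst hs'; exact h
      · intro hall s' hs'
        exact hall s' (List.mem_append.mpr (Or.inl hs'))

theorem om_some (first : List Int) (y : Int) :
    ∀ (L : List Nat) (v : Int), om first y L = some v →
      (∃ s ∈ L, xbL first s = y ∧ v = pcN s) ∧ (∀ s ∈ L, xbL first s = y → v ≤ pcN s) := by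
  intro L
  induction L using List.reverseRecOn with
  | nil => intro v h; simp [om] at h
  | append_singleton L s ih =>
    intro v h
    rw [om_append_singleton] at h
    unfold omStep at h
    by_cases hy : xbL first s = y
    · rw [if_pos hy] at h
      cases ho : om first y L with
      | none =>
        rw [ho] at h
        simp only [Option.some_inj] at h
        refine ⟨⟨s, by simp, hy, h.symm⟩, ?_⟩
        intro s' hs' hy'
        rcases List.mem_append.mp hs' with hs' | hs'
        · exact absurd hy' ((om_none_iff first y L).mp ho s' hs')
        · simp at hs'; subst hs'; omega
      | some w =>
        rw [ho] at h
        simp only [Option.some_inj] at h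
        obtain ⟨⟨s₀, hs₀, hy₀, hw⟩, hlb⟩ := ih w ho
        rcases min_choice w (pcN s) with hmin | hmin
        · refine ⟨⟨s₀, by simp [hs₀], hy₀, by omega⟩, ?_⟩
          intro s' hs' hy'
          rcases List.mem_append.mp hs' with hs' | hs'
          · have := hlb s' hs' hy'
            omega
          · simp at hs'; subst hs'
            have : min w (pcN s') ≤ pcN s' := min_le_right _ _
            omega
        · refine ⟨⟨s, by simp, hy, by omega⟩, ?_⟩
          intro s' hs' hy'
          rcases List.mem_append.mp hs' with hs' | hs'
          · have := hlb s' hs' hy'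
            have : min w (pcN s) ≤ w := min_le_left _ _
            omega
          · simp at hs'; subst hs'; omega
    · rw [if_neg hy] at h
      obtain ⟨⟨s₀, hs₀, hy₀, hw⟩, hlb⟩ := ih v h
      refine ⟨⟨s₀, by simp [hs₀], hy₀, hw⟩, ?_⟩
      intro s' hs' hy'
      rcases List.mem_append.mp hs' with hs' | hs'
      · exact hlb s' hs' hy'
      · simp at hs'; subst hs'; exact absurd hy' hy

def loopAStep (bf : PySem.Dict Int Int) (target : Int) (X2 : Nat → Int) (best : Int) (s2 : Nat) : Int :=
  match PySem.Dict.get? bf (PySem.Int.bxor target (X2 s2)) with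
  | none => best
  | some v => if pcN s2 + v < best then pcN s2 + v else best

def loopA (bf : PySem.Dict Int Int) (target : Int) (X2 : Nat → Int) (L : List Nat) (b : Int) : Int :=
  L.foldl (loopAStep bf target X2) b

theorem loopA_append (bf : PySem.Dict Int Int) (target : Int) (X2 : Nat → Int) (L : List Nat)
    (s : Nat) (b : Int) :
    loopA bf target X2 (L ++ [s]) b = loopAStep bf target X2 (loopA bf target X2 L b) s := by
  unfold loopA
  rw [List.foldl_append, List.foldl_cons, List.foldl_nil]

theorem loopAStep_none (bf : PySem.Dict Int Int) (target : Int) (X2 : Nat → Int) (b : Int) (s2 : Nat)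
    (hv : PySem.Dict.get? bf (PySem.Int.bxor target (X2 s2)) = none) :
    loopAStep bf target X2 b s2 = b := by
  unfold loopAStep
  rw [hv]

theorem loopAStep_some (bf : PySem.Dict Int Int) (target : Int) (X2 : Nat → Int) (b : Int) (s2 : Nat)
    (v : Int) (hv : PySem.Dict.get? bf (PySem.Int.bxor target (X2 s2)) = some v) :
    loopAStep bf target X2 b s2 = if pcN s2 + v < b then pcN s2 + v else b := by
  unfold loopAStep
  rw [hv]

theorem loopAStep_le (bf : PySem.Dict Int Int) (target : Int) (X2 : Nat → Int) (b : Int) (s2 : Nat) :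
    loopAStep bf target X2 b s2 ≤ b := by
  cases hv : PySem.Dict.get? bf (PySem.Int.bxor target (X2 s2)) with
  | none => rw [loopAStep_none bf target X2 b s2 hv]
  | some v =>
    rw [loopAStep_some bf target X2 b s2 v hv]
    by_cases h : pcN s2 + v < b
    · rw [if_pos h]; omega
    · rw [if_neg h]

theorem loopA_le (bf : PySem.Dict Int Int) (target : Int) (X2 : Nat → Int) :
    ∀ (L : List Nat) (b : Int), loopA bf target X2 L b ≤ b := by
  intro L
  induction L using List.reverseRecOn with
  | nil => intro b; exact le_refl b
  | append_singleton L s ih =>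
    intro b
    rw [loopA_append]
    exact le_trans (loopAStep_le bf target X2 _ s) (ih b)

theorem loopA_lb (bf : PySem.Dict Int Int) (target : Int) (X2 : Nat → Int) :
    ∀ (L : List Nat) (b : Int) (s2 : Nat), s2 ∈ L → ∀ (v : Int),
      PySem.Dict.get? bf (PySem.Int.bxor target (X2 s2)) = some v →
      loopA bf target X2 L b ≤ pcN s2 + v := by
  intro L
  induction L using List.reverseRecOn with
  | nil => intro b s2 hs2; simp at hs2
  | append_singleton L s ih =>
    intro b s2 hs2 v hv
    rw [loopA_append]
    rcases List.mem_append.mp hs2 with hs2 | hs2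
    · exact le_trans (loopAStep_le bf target X2 _ s) (ih b s2 hs2 v hv)
    · simp at hs2; subst hs2
      rw [loopAStep_some bf target X2 _ s2 v hv]
      split_ifs with h
      · omega
      · omega

theorem loopA_mem (bf : PySem.Dict Int Int) (target : Int) (X2 : Nat → Int) :
    ∀ (L : List Nat) (b : Int),
      loopA bf target X2 L b = b ∨
        ∃ s2 ∈ L, ∃ v, PySem.Dict.get? bf (PySem.Int.bxor target (X2 s2)) = some v ∧
          loopA bf target X2 L b = pcN s2 + v := by
  intro L
  induction L using List.reverseRecOn with
  | nil => intro b; exact Or.inl rfl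
  | append_singleton L s ih =>
    intro b
    rw [loopA_append]
    cases hv : PySem.Dict.get? bf (PySem.Int.bxor target (X2 s)) with
    | none =>
      rw [loopAStep_none bf target X2 _ s hv]
      rcases ih b with h | ⟨s2, hs2, v, hv2, hval⟩
      · exact Or.inl h
      · exact Or.inr ⟨s2, List.mem_append.mpr (Or.inl hs2), v, hv2, hval⟩
    | some v =>
      rw [loopAStep_some bf target X2 _ s v hv]
      by_cases h : pcN s + v < loopA bf target X2 L b
      · rw [if_pos h]
        exact Or.inr ⟨s, by simp, v, hv, rfl⟩
      · rw [if_neg h]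
        rcases ih b with hh | ⟨s2, hs2, w, hv2, hval⟩
        · exact Or.inl hh
        · exact Or.inr ⟨s2, List.mem_append.mpr (Or.inl hs2), w, hv2, hval⟩

theorem goAlt_lb (target : Int) : ∀ (bs : List Int) (acc cnt : Int) (s : Nat), s < 2 ^ bs.length →
    goAlt target bs acc cnt ≤
      (if PySem.Int.bxor acc (xbL bs s) = target then cnt + pcN s else 10 ^ 18) := by
  intro bs
  induction bs with
  | nil =>
    intro acc cnt s hs
    have hs0 : s = 0 := by simpa using hs
    subst hs0
    simp only [goAlt, xbL, PySem.Int.bxor_zero, pcN_zero, add_zero]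
    exact le_refl _
  | cons b rest ih =>
    intro acc cnt s hs
    have hq : s / 2 < 2 ^ rest.length := by
      rw [show (b :: rest).length = rest.length + 1 from rfl, pow_succ] at hs
      omega
    have hsplit : s = 2 * (s / 2) + s % 2 := by omega
    rw [hsplit, xbL_cons _ _ _ _ (by omega)]
    by_cases hr : s % 2 = 1
    · rw [if_pos hr]
      have h1 := ih (PySem.Int.bxor acc b) (cnt + 1) (s / 2) hq
      have heq : PySem.Int.bxor acc (PySem.Int.bxor b (xbL rest (s / 2))) =
          PySem.Int.bxor (PySem.Int.bxor acc b) (xbL rest (s / 2)) := (bxor_assoc' _ _ _).symm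
      have hpc : pcN (2 * (s / 2) + s % 2) = pcN (s / 2) + 1 := by
        rw [pcN_double _ _ (by omega), hr]
        norm_num
      rw [heq, hpc]
      calc goAlt target (b :: rest) acc cnt ≤ goAlt target rest (PySem.Int.bxor acc b) (cnt + 1) :=
            min_le_right _ _
        _ ≤ _ := by
            refine le_trans h1 ?_
            by_cases hcond : PySem.Int.bxor (PySem.Int.bxor acc b) (xbL rest (s / 2)) = target
            · rw [if_pos hcond, if_pos hcond]; omega
            · rw [if_neg hcond, if_neg hcond]
    · rw [if_neg hr]
      have hr0 : s % 2 = 0 := by omega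
      have h1 := ih acc cnt (s / 2) hq
      have hpc : pcN (2 * (s / 2) + s % 2) = pcN (s / 2) := by
        rw [pcN_double _ _ (by omega), hr0]
        norm_num
      rw [bxor_zero_left, hpc]
      exact le_trans (min_le_left _ _) h1

theorem goAlt_mem (target : Int) : ∀ (bs : List Int) (acc cnt : Int),
    ∃ s < 2 ^ bs.length, goAlt target bs acc cnt =
      (if PySem.Int.bxor acc (xbL bs s) = target then cnt + pcN s else 10 ^ 18) := by
  intro bs
  induction bs with
  | nil =>
    intro acc cnt
    refine ⟨0, by norm_num, ?_⟩
    simp only [goAlt, xbL, PySem.Int.bxor_zero, pcN_zero, add_zero]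
  | cons b rest ih =>
    intro acc cnt
    have hpow : 2 ^ (b :: rest).length = 2 * 2 ^ rest.length := by
      rw [show (b :: rest).length = rest.length + 1 from rfl, pow_succ]; ring
    rcases min_choice (goAlt target rest acc cnt)
      (goAlt target rest (PySem.Int.bxor acc b) (cnt + 1)) with hmin | hmin
    · obtain ⟨q, hq, hval⟩ := ih acc cnt
      refine ⟨2 * q, by omega, ?_⟩
      rw [show goAlt target (b :: rest) acc cnt =
        min (goAlt target rest acc cnt) (goAlt target rest (PySem.Int.bxor acc b) (cnt + 1)) from rfl,
        hmin, hval, show 2 * q = 2 * q + 0 by omega, xbL_cons _ _ _ _ (by omega),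
        pcN_double _ _ (by omega)]
      norm_num [bxor_zero_left]
    · obtain ⟨q, hq, hval⟩ := ih (PySem.Int.bxor acc b) (cnt + 1)
      refine ⟨2 * q + 1, by omega, ?_⟩
      rw [show goAlt target (b :: rest) acc cnt =
        min (goAlt target rest acc cnt) (goAlt target rest (PySem.Int.bxor acc b) (cnt + 1)) from rfl,
        hmin, hval, xbL_cons _ _ _ _ (by omega), pcN_double _ _ (by omega)]
      have heq : PySem.Int.bxor acc (PySem.Int.bxor b (xbL rest q)) =
          PySem.Int.bxor (PySem.Int.bxor acc b) (xbL rest q) := (bxor_assoc' _ _ _).symm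
      rw [if_pos rfl, heq]
      by_cases hcond : PySem.Int.bxor (PySem.Int.bxor acc b) (xbL rest q) = target
      · rw [if_pos hcond, if_pos hcond]
        push_cast
        ring
      · rw [if_neg hcond, if_neg hcond]

theorem sxa_eq (bs : List Int) :
    subset_xor_arrays bs =
      ((List.range (2 ^ bs.length)).map (fun s => xbL bs s),
       (List.range (2 ^ bs.length)).map (fun s => pcN s)) := by
  have hsize : ((1 : Int) <<< bs.length) = ((2 ^ bs.length : Nat) : Int) := by
    rw [Int.shiftLeft_eq]
    push_cast
    ring
  have hrep : PySem.List.pyRepeat [(0 : Int)] ((1 : Int) <<< bs.length) =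
      List.replicate (2 ^ bs.length) (0 : Int) := by
    rw [PySem.List.pyRepeat_singleton, hsize, Int.toNat_natCast]
  have hport : subset_xor_arrays bs =
      (PySem.List.pyRange 1 (((2 ^ bs.length : Nat) : Int))).foldl (sxaStep bs)
        (List.replicate (2 ^ bs.length) 0, List.replicate (2 ^ bs.length) 0) := by
    simp only [subset_xor_arrays]
    rw [hrep, hsize]
    rfl
  obtain ⟨⟨hl1, hl2⟩, hx, hc⟩ := sxa_loop bs (2 ^ bs.length) (le_refl _)
  rw [hport]
  have e1 : ((PySem.List.pyRange 1 (((2 ^ bs.length : Nat) : Int))).foldl (sxaStep bs)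
        (List.replicate (2 ^ bs.length) 0, List.replicate (2 ^ bs.length) 0)).1 =
      (List.range (2 ^ bs.length)).map (fun s => xbL bs s) := by
    apply List.ext_getElem
    · rw [hl1]; simp
    · intro i h1 h2
      have hi : i < 2 ^ bs.length := by simpa using h2
      rw [← List.getD_eq_getElem _ 0 h1, hx i hi, if_pos hi]
      simp
  have e2 : ((PySem.List.pyRange 1 (((2 ^ bs.length : Nat) : Int))).foldl (sxaStep bs)
        (List.replicate (2 ^ bs.length) 0, List.replicate (2 ^ bs.length) 0)).2 =
      (List.range (2 ^ bs.length)).map (fun s => pcN s) := by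
    apply List.ext_getElem
    · rw [hl2]; simp
    · intro i h1 h2
      have hi : i < 2 ^ bs.length := by simpa using h2
      rw [← List.getD_eq_getElem _ 0 h1, hc i hi, if_pos hi]
      simp
  rw [← e1, ← e2]

theorem bxor_eq_iff (x y t : Int) : PySem.Int.bxor x y = t ↔ x = PySem.Int.bxor t y := by
  constructor
  · rintro rfl
    rw [bxor_assoc', PySem.Int.bxor_self, PySem.Int.bxor_zero]
  · rintro rfl
    rw [bxor_assoc', PySem.Int.bxor_self, PySem.Int.bxor_zero]

theorem main_eq (target : Int) (buttons : List Int) :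
    min_presses target buttons = min_presses_alt target buttons := by
  by_cases ht : target = 0
  · simp [min_presses, min_presses_alt, ht]
  · -- names for the two halves
    have hmid : PySem.Int.floordiv (buttons.length : Int) 2 = ((buttons.length / 2 : Nat) : Int) := by
      exact_mod_cast PySem.Int.floordiv_natCast buttons.length 2
    set h2 := buttons.length / 2 with hh2
    set F := buttons.take h2 with hF
    set S := buttons.drop h2 with hS
    have hFS : F ++ S = buttons := List.take_append_drop h2 buttons
    have hlen : F.length + S.length = buttons.length := by
      rw [← hFS]; simp
    set N1 := 2 ^ F.length with hN1
    set N2 := 2 ^ S.length with hN2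
    set bf := (List.range N1).foldl (fun d s => dStep d (xbL F s, pcN s)) PySem.Dict.empty with hbf
    have hA : min_presses target buttons =
        loopA bf target (fun s => xbL S s) (List.range N2) (10 ^ 18) := by
      simp only [min_presses, if_neg ht]
      rw [hmid, PySem.List.slice_to_natCast, PySem.List.slice_from_natCast,
        sxa_eq, sxa_eq]
      simp only [List.zip_map', List.foldl_map]
      unfold loopA loopAStep
      rfl
    have hB : min_presses_alt target buttons = goAlt target buttons 0 0 := by
      simp only [min_presses_alt, if_neg ht]
    rw [hA, hB]
    -- dictionary lookups
    have hget : ∀ y : Int, PySem.Dict.get? bf y = om F y (List.range N1) := by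
      intro y
      rw [hbf, show (List.range N1).foldl (fun d s => dStep d (xbL F s, pcN s)) PySem.Dict.empty =
        ((List.range N1).map (fun s => (xbL F s, pcN s))).foldl dStep PySem.Dict.empty from
        (List.foldl_map).symm, dict_get_gen]
      rfl
    have hcover : ∀ s : Nat, s < 2 ^ buttons.length →
        xbL buttons s = PySem.Int.bxor (xbL F (s % N1)) (xbL S (s / N1)) ∧
        pcN s = pcN (s % N1) + pcN (s / N1) ∧ s % N1 < N1 ∧ s / N1 < N2 := by
      intro s hs
      have hmod : s % N1 < N1 := Nat.mod_lt _ (by positivity)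
      have hdiv : s / N1 < N2 := by
        apply Nat.div_lt_of_lt_mul
        rw [hN1, hN2, ← pow_add, hlen]
        exact hs
      have hsplit : s = s % N1 + N1 * (s / N1) := (Nat.mod_add_div s N1).symm
      constructor
      · conv_lhs => rw [← hFS, hsplit]
        exact xbL_append F S (s % N1) (s / N1) hmod
      · refine ⟨?_, hmod, hdiv⟩
        conv_lhs => rw [hsplit]
        exact pcN_split F.length (s % N1) (s / N1) hmod
    apply le_antisymm
    · -- A ≤ B
      obtain ⟨s, hs, hval⟩ := goAlt_mem target buttons 0 0
      rw [hval, bxor_zero_left]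
      by_cases hcond : xbL buttons s = target
      · rw [if_pos hcond]
        obtain ⟨hxsplit, hpsplit, hmod, hdiv⟩ := hcover s hs
        have hx1 : xbL F (s % N1) = PySem.Int.bxor target (xbL S (s / N1)) := by
          have h' : PySem.Int.bxor (xbL F (s % N1)) (xbL S (s / N1)) = target := by
            rw [← hxsplit, hcond]
          exact (bxor_eq_iff _ _ _).mp h'
        have hnone : om F (PySem.Int.bxor target (xbL S (s / N1))) (List.range N1) ≠ none := by
          intro hnone
          exact absurd hx1 ((om_none_iff F _ (List.range N1)).mp hnone (s % N1) (List.mem_range.mpr hmod))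
        cases hv : om F (PySem.Int.bxor target (xbL S (s / N1))) (List.range N1) with
        | none => exact absurd hv hnone
        | some v =>
          obtain ⟨_, hlb⟩ := om_some F _ (List.range N1) v hv
          have hvle : v ≤ pcN (s % N1) := hlb (s % N1) (List.mem_range.mpr hmod) hx1
          have := loopA_lb bf target (fun s => xbL S s) (List.range N2) (10 ^ 18)
            (s / N1) (List.mem_range.mpr hdiv) v (by rw [hget]; exact hv)
          rw [hpsplit]
          omega
      · rw [if_neg hcond]
        exact loopA_le bf target _ (List.range N2) (10 ^ 18)
    · -- B ≤ A
      rcases loopA_mem bf target (fun s => xbL S s) (List.range N2) (10 ^ 18) with hAval | hAval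
      · rw [hAval]
        have h0 := goAlt_lb target buttons 0 0 0 (by positivity)
        rw [xbL_zero, PySem.Int.bxor_zero,
          if_neg (show ¬(0 : Int) = target from fun h => ht h.symm)] at h0
        exact h0
      · obtain ⟨s2, hs2, v, hv, hAval⟩ := hAval
        rw [hget] at hv
        obtain ⟨⟨s1, hs1, hy1, hveq⟩, _⟩ := om_some F _ (List.range N1) v hv
        rw [List.mem_range] at hs1 hs2
        have hslt : s1 + N1 * s2 < 2 ^ buttons.length := by
          have h1 : s1 + N1 * s2 < N1 * (s2 + 1) := by
            have := Nat.mul_le_mul_left N1 (Nat.succ_le_of_lt hs2)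
            nlinarith
          have h2 : N1 * (s2 + 1) ≤ N1 * N2 := Nat.mul_le_mul_left N1 (by omega)
          have h3 : N1 * N2 = 2 ^ buttons.length := by
            rw [hN1, hN2, ← pow_add, hlen]
          omega
        have hcond : xbL buttons (s1 + N1 * s2) = target := by
          have hm : (s1 + N1 * s2) % N1 = s1 := by
            rw [Nat.add_mul_mod_self_left]
            exact Nat.mod_eq_of_lt hs1
          have hd : (s1 + N1 * s2) / N1 = s2 := by
            rw [Nat.add_mul_div_left _ _ (by positivity : 0 < N1), Nat.div_eq_of_lt hs1]
            omega
          obtain ⟨hxsplit, _, _, _⟩ := hcover (s1 + N1 * s2) hslt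
          rw [hxsplit, hm, hd, hy1]
          exact (bxor_eq_iff _ _ _).mpr rfl
        have hle := goAlt_lb target buttons 0 0 (s1 + N1 * s2) hslt
        rw [bxor_zero_left, hcond, if_pos rfl] at hle
        obtain ⟨_, hpsplit, _, _⟩ := hcover (s1 + N1 * s2) hslt
        have hm : (s1 + N1 * s2) % N1 = s1 := by
          rw [Nat.add_mul_mod_self_left]
          exact Nat.mod_eq_of_lt hs1
        have hd : (s1 + N1 * s2) / N1 = s2 := by
          rw [Nat.add_mul_div_left _ _ (by positivity : 0 < N1), Nat.div_eq_of_lt hs1]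
          omega
        rw [hpsplit, hm, hd] at hle
        rw [hAval]
        omega

theorem main_eq_spec (target : Int) (buttons : List Int) :
    Spec_min_presses target buttons (min_presses target buttons) := main_eq target buttons

-- ===== VERDICT (by name: the statement is the Claim_ definition above) =====
theorem min_presses_spec : Claim_equal_min_presses := by
  intro target buttons _
  exact main_eq_spec target buttons
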